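-- pv_equiv track=rewrite | github.com/anezuniga/grammar_truss_microstructure | scripts_generation/connections.py | format_edges_step
-- ===== SOURCE A (Python) =====
-- def format_edges_step(edges_matrix):
--     formatted_edges = {}
--     for i in range(len(edges_matrix)):
--         for j in range(i+1, len(edges_matrix[i])):
--             if edges_matrix[i][j] == 1:
--                 key = "e" + str(len(formatted_edges))
--                 vertex1 = "v" + str(i)
--                 vertex2 = "v" + str(j)
--                 formatted_edges[key] = [vertex1, vertex2]
--             elif edges_matrix[i][j] == -1:
--                 key = "nt" + str(len(formatted_edges))
--                 vertex1 = "v" + str(i)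
--                 vertex2 = "v" + str(j)
--                 formatted_edges[key] = [vertex1, vertex2]
--     return formatted_edges
-- ===== SOURCE B (Python) =====
-- def format_edges_step(edges_matrix):
--     # Divide-and-conquer over contiguous row blocks; threads an explicit edge
--     # counter instead of keying by a growing dict's length, and builds the dict
--     # once at the end from plain (key, value) pairs.
--     def go(rows, i, k):
--         # rows: contiguous block whose first row has global index i; k: next edge number.
--         n = len(rows)
--         if n == 0:
--             return [], k
--         if n == 1:
--             out = []
--             for j, v in enumerate(rows[0][i + 1:], i + 1):
--                 if v == 1 or v == -1:
--                     out.append((("e" if v == 1 else "nt") + str(k),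
--                                 ["v" + str(i), "v" + str(j)]))
--                     k += 1
--             return out, k
--         h = n // 2
--         left, k = go(rows[:h], i, k)
--         right, k = go(rows[h:], i + h, k)
--         return left + right, k
--
--     pairs, _ = go(edges_matrix, 0, 0)
--     return dict(pairs)
-- ===== Notes on version B (the rewrite author's own statement) =====
-- stated objective: alternative
-- what changed: Replaces the fused nested index-loop that mutates a dict and keys each edge by the dict's current length with a divide-and-conquer recursion over contiguous row blocks: each half is processed with an explicitly threaded edge counter, a single row's cells come from enumerate over the sliced row tail, the halves' pair lists are concatenated, and the dict is built once at the end.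
import Mathlib
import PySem

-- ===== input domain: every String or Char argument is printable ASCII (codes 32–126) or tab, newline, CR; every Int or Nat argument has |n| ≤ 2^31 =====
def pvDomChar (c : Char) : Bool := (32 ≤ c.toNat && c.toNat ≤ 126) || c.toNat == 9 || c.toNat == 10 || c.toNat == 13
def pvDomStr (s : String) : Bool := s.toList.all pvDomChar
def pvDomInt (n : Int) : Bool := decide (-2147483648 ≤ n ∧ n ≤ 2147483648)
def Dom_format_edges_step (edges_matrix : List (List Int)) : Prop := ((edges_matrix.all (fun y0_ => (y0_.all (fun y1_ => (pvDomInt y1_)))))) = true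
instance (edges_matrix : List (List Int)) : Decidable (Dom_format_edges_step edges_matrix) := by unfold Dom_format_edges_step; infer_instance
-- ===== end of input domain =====

-- B replaces A's fused nested index-loop (which mutates a dict and keys each edge by the
-- dict's current length) with a divide-and-conquer recursion over contiguous row blocks that
-- threads an explicit edge counter and builds the dict once at the end; same cost, different
-- algorithmic decomposition.

-- ===== PORT A =====
def format_edges_step (edges_matrix : List (List Int)) : List (String × List String) :=
  ((PySem.List.pyRange 0 (edges_matrix.length : Int)).foldl (fun fe i =>
      (PySem.List.pyRange (i + 1) (((PySem.List.pyGet? edges_matrix i).getD []).length : Int)).foldl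
        (fun fe j =>
          let v := (PySem.List.pyGet? ((PySem.List.pyGet? edges_matrix i).getD []) j).getD 0
          if v = 1 then
            fe.insert ("e" ++ PySem.Int.toStr (fe.size : Int))
              ["v" ++ PySem.Int.toStr i, "v" ++ PySem.Int.toStr j]
          else if v = -1 then
            fe.insert ("nt" ++ PySem.Int.toStr (fe.size : Int))
              ["v" ++ PySem.Int.toStr i, "v" ++ PySem.Int.toStr j]
          else fe) fe)
    (PySem.Dict.empty)).items

-- ===== PORT B =====
-- the body of B's single-row loop (the `for j, v in enumerate(rows[0][i+1:], i+1)` loop)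
def pvStepB (i : Int) (st : List (String × List String) × Int) (p : Int × Int) :
    List (String × List String) × Int :=
  if p.2 = 1 ∨ p.2 = -1 then
    (st.1 ++ [((if p.2 = 1 then "e" else "nt") ++ PySem.Int.toStr st.2,
               ["v" ++ PySem.Int.toStr i, "v" ++ PySem.Int.toStr p.1])], st.2 + 1)
  else st

-- B's `n == 1` branch: scan one row's tail
def pvRowB (row : List Int) (i k : Int) : List (String × List String) × Int :=
  (PySem.List.enumerate (PySem.List.slice row (some (i + 1)) none) (i + 1)).foldl
    (pvStepB i) ([], k)

-- B's recursive `go`: halve the block of rows (rows[:h] / rows[h:] with h = n // 2)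
def pvGoB (rows : List (List Int)) (i k : Int) : List (String × List String) × Int :=
  if h0 : rows.length = 0 then ([], k)
  else if h1 : rows.length = 1 then pvRowB rows.headI i k
  else
    let h := rows.length / 2
    let l := pvGoB (rows.take h) i k
    let r := pvGoB (rows.drop h) (i + (h : Int)) l.2
    (l.1 ++ r.1, r.2)
termination_by rows.length
decreasing_by
  · exact (List.length_take ..).trans_lt
      (lt_of_le_of_lt (min_le_left _ _) (Nat.div_lt_self (Nat.pos_of_ne_zero h0) one_lt_two))
  · exact (List.length_drop ..).trans_lt
      (Nat.sub_lt (Nat.pos_of_ne_zero h0)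
        (Nat.div_pos (Nat.lt_of_le_of_ne (Nat.one_le_iff_ne_zero.mpr h0) (Ne.symm h1)) two_pos))

def format_edges_step_alt (edges_matrix : List (List Int)) : List (String × List String) :=
  (PySem.Dict.ofList (pvGoB edges_matrix 0 0).1).items

-- ===== PRECONDITION & SPEC =====
def Spec_format_edges_step (edges_matrix : List (List Int)) (out : List (String × List String)) : Prop := out = format_edges_step_alt edges_matrix
instance (edges_matrix : List (List Int)) (out : List (String × List String)) : Decidable (Spec_format_edges_step edges_matrix out) := by unfold Spec_format_edges_step; infer_instance

-- ===== CLAIM (what is proved, stated in full; the proofs are below) =====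
def Claim_equal_format_edges_step : Prop := ∀ (edges_matrix : List (List Int)), Dom_format_edges_step edges_matrix → Spec_format_edges_step edges_matrix (format_edges_step edges_matrix)

-- ===== LEMMAS AND PROOFS =====

-- str(n) is injective on the non-negative integers (proved via a base-10 evaluation map).

theorem pvToDigitsCore_acc (f : Nat) : ∀ (n : Nat) (l : List Char),
    Nat.toDigitsCore 10 f n l = Nat.toDigitsCore 10 f n [] ++ l := by
  induction f with
  | zero => intro n l; simp [Nat.toDigitsCore]
  | succ f ih =>
    intro n l
    simp only [Nat.toDigitsCore]
    by_cases h : n / 10 = 0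
    · simp [h]
    · simp only [h, if_false]
      rw [ih (n / 10) ((n % 10).digitChar :: l), ih (n / 10) [(n % 10).digitChar]]
      simp

theorem pvToDigitsCore_fuel (f : Nat) : ∀ (f' n : Nat), 0 < f → 0 < f' →
    n < 10 ^ f → n < 10 ^ f' →
    Nat.toDigitsCore 10 f n [] = Nat.toDigitsCore 10 f' n [] := by
  induction f with
  | zero => intro f' n h; omega
  | succ f ih =>
    intro f' n _ hf' hnf hnf'
    cases f' with
    | zero => omega
    | succ f' =>
      simp only [Nat.toDigitsCore]
      by_cases h : n / 10 = 0
      · simp [h]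
      · simp only [h, if_false]
        rw [pvToDigitsCore_acc f, pvToDigitsCore_acc f']
        have h10 : 10 ≤ n := by omega
        have hf0 : 0 < f := by
          by_contra hc
          have : f = 0 := by omega
          subst this
          simp [pow_one] at hnf
          omega
        have hf'0 : 0 < f' := by
          by_contra hc
          have : f' = 0 := by omega
          subst this
          simp [pow_one] at hnf'
          omega
        rw [ih f' (n / 10) hf0 hf'0
          (by
            have := Nat.div_lt_of_lt_mul (by
              calc n < 10 ^ (f + 1) := hnf
              _ = 10 * 10 ^ f := by ring)
            omega)
          (by
            have := Nat.div_lt_of_lt_mul (by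
              calc n < 10 ^ (f' + 1) := hnf'
              _ = 10 * 10 ^ f' := by ring)
            omega)]

def pvRep (n : Nat) : List Char := Nat.toDigits 10 n

theorem pvRep_step (n : Nat) (h : 10 ≤ n) :
    pvRep n = pvRep (n / 10) ++ [(n % 10).digitChar] := by
  unfold pvRep Nat.toDigits
  have hd : ¬ n / 10 = 0 := by omega
  conv_lhs => rw [Nat.toDigitsCore]
  simp only [hd, if_false]
  rw [pvToDigitsCore_acc]
  congr 1
  have h1 : n / 10 < 10 ^ n :=
    lt_trans (Nat.div_lt_self (by omega) (by omega)) (Nat.lt_pow_self (by norm_num))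
  have h2 : n / 10 < 10 ^ (n / 10 + 1) :=
    lt_of_lt_of_le (Nat.lt_pow_self (a := 10) (by norm_num))
      (Nat.pow_le_pow_right (by norm_num) (by omega))
  exact pvToDigitsCore_fuel n (n / 10 + 1) (n / 10) (by omega) (by omega) h1 h2

def pvVal (cs : List Char) : Nat := cs.foldl (fun a c => a * 10 + (c.toNat - 48)) 0

theorem pvDigitChar_val (m : Nat) (h : m < 10) : (Nat.digitChar m).toNat - 48 = m := by
  interval_cases m <;> decide

theorem pvVal_rep (n : Nat) : pvVal (pvRep n) = n := by
  induction n using Nat.strong_induction_on with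
  | _ n ih =>
    by_cases h : n < 10
    · have hd : n / 10 = 0 := by omega
      unfold pvRep Nat.toDigits
      rw [Nat.toDigitsCore]
      simp only [hd, if_true]
      have : n % 10 = n := by omega
      rw [this]
      simpa [pvVal] using pvDigitChar_val n h
    · rw [pvRep_step n (by omega)]
      unfold pvVal
      rw [List.foldl_append]
      have := ih (n / 10) (Nat.div_lt_self (by omega) (by omega))
      unfold pvVal at this
      simp only [List.foldl_cons, List.foldl_nil, this]
      rw [pvDigitChar_val (n % 10) (by omega)]
      omega

theorem pvRep_inj {m n : Nat} (h : pvRep m = pvRep n) : m = n := by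
  have := pvVal_rep m
  rw [h, pvVal_rep] at this
  omega

theorem pvToStr_toList_nonneg (a : Int) (ha : 0 ≤ a) :
    (PySem.Int.toStr a).toList = pvRep a.toNat := by
  unfold PySem.Int.toStr PySem.Int.toChars
  rw [if_neg (by omega)]
  simp [pvRep]

theorem pvKey_inj (p q : String) (hp : p = "e" ∨ p = "nt") (hq : q = "e" ∨ q = "nt")
    (a b : Int) (ha : 0 ≤ a) (hb : 0 ≤ b)
    (h : p ++ PySem.Int.toStr a = q ++ PySem.Int.toStr b) : a = b := by
  have h' := congrArg String.toList h
  rw [String.toList_append, String.toList_append,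
    pvToStr_toList_nonneg a ha, pvToStr_toList_nonneg b hb] at h'
  have hab : a.toNat = b.toNat := by
    rcases hp with hp | hp <;> rcases hq with hq | hq <;> subst hp <;> subst hq <;>
      simp only [show ("e" : String).toList = ['e'] from rfl,
        show ("nt" : String).toList = ['n', 't'] from rfl, List.cons_append,
        List.nil_append, List.cons.injEq] at h' <;>
      first
        | exact pvRep_inj h'.2
        | exact pvRep_inj h'.2.2
        | (exact absurd h'.1 (by decide))
  omega

-- the shared cell-processing step of A's fused loop
def pvStep (fe : PySem.Dict String (List String)) (c : Int × Int × Int) :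
    PySem.Dict String (List String) :=
  if c.2.2 = 1 then
    fe.insert ("e" ++ PySem.Int.toStr (fe.size : Int))
      ["v" ++ PySem.Int.toStr c.1, "v" ++ PySem.Int.toStr c.2.1]
  else if c.2.2 = -1 then
    fe.insert ("nt" ++ PySem.Int.toStr (fe.size : Int))
      ["v" ++ PySem.Int.toStr c.1, "v" ++ PySem.Int.toStr c.2.1]
  else fe

def pvAllCells (edges_matrix : List (List Int)) : List (Int × Int × Int) :=
  (PySem.List.pyRange 0 (edges_matrix.length : Int)).flatMap (fun i =>
    (PySem.List.pyRange (i + 1) (((PySem.List.pyGet? edges_matrix i).getD []).length : Int)).map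
      (fun j => (i, j, (PySem.List.pyGet? ((PySem.List.pyGet? edges_matrix i).getD []) j).getD 0)))

def pvGood (c : Int × Int × Int) : Bool := decide (c.2.2 = 1 ∨ c.2.2 = -1)

def pvFmt (p : Int × Int × Int × Int) : String × List String :=
  ((if p.2.2.2 = 1 then "e" else "nt") ++ PySem.Int.toStr p.1,
   ["v" ++ PySem.Int.toStr p.2.1, "v" ++ PySem.Int.toStr p.2.2.1])

-- the qualifying cells, built structurally: per-row …
def pvRowCells (row : List Int) (i : Nat) : List (Int × Int × Int) :=
  (PySem.List.enumerate (row.drop (i + 1)) (((i : Int)) + 1)).filterMap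
    (fun p => if p.2 = 1 ∨ p.2 = -1 then some ((i : Int), p.1, p.2) else none)

-- … and over a block of rows whose first row has index i
def pvCellsSeg (rows : List (List Int)) (i : Nat) : List (Int × Int × Int) :=
  match rows with
  | [] => []
  | r :: rest => pvRowCells r i ++ pvCellsSeg rest (i + 1)

theorem pvA_eq_fold (em : List (List Int)) :
    format_edges_step em = ((pvAllCells em).foldl pvStep PySem.Dict.empty).items := by
  unfold format_edges_step pvAllCells
  rw [List.foldl_flatMap]
  exact congrArg PySem.Dict.items
    (congrArg (fun f => List.foldl f PySem.Dict.empty (PySem.List.pyRange 0 (em.length : Int)))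
      (by funext fe i; rw [List.foldl_map]; rfl))

theorem pvFold_filter (cs : List (Int × Int × Int)) :
    ∀ d, cs.foldl pvStep d = (cs.filter pvGood).foldl pvStep d := by
  induction cs with
  | nil => intro d; rfl
  | cons c cs ih =>
    intro d
    by_cases h : pvGood c = true
    · rw [List.foldl_cons, List.filter_cons_of_pos h, List.foldl_cons, ih]
    · have h2 : ¬ (c.2.2 = 1 ∨ c.2.2 = -1) := by simpa [pvGood] using h
      rw [List.foldl_cons, List.filter_cons_of_neg h,
        show pvStep d c = d from by
          unfold pvStep
          rw [if_neg (fun hc => h2 (Or.inl hc)), if_neg (fun hc => h2 (Or.inr hc))],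
        ih]

theorem pvFold_items (cs : List (Int × Int × Int)) :
    ∀ (d : PySem.Dict String (List String)),
    (∀ c ∈ cs, c.2.2 = 1 ∨ c.2.2 = -1) →
    (∀ k ∈ d.keys, ∃ m : Nat, m < d.size ∧
       (k = "e" ++ PySem.Int.toStr (m : Int) ∨ k = "nt" ++ PySem.Int.toStr (m : Int))) →
    (cs.foldl pvStep d).items = d.items ++ (PySem.List.enumerate cs (d.size : Int)).map pvFmt := by
  induction cs with
  | nil => intro d _ _; simp [PySem.List.enumerate]
  | cons c cs ih =>
    intro d hgood hkeys
    obtain ⟨i, j, v⟩ := c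
    have hv : v = 1 ∨ v = -1 := hgood (i, j, v) (List.mem_cons_self ..)
    set p : String := if v = 1 then "e" else "nt" with hpdef
    have hp : p = "e" ∨ p = "nt" := by
      by_cases h1 : v = 1 <;> simp [hpdef, h1]
    have hfresh : d.contains (p ++ PySem.Int.toStr (d.size : Int)) = false := by
      by_contra hc
      have hc' : d.contains (p ++ PySem.Int.toStr (d.size : Int)) = true := by
        revert hc; cases d.contains (p ++ PySem.Int.toStr (d.size : Int)) <;> simp
      have hmem := (PySem.Dict.contains_iff_mem_keys d _).mp hc'
      obtain ⟨m, hm, hk⟩ := hkeys _ hmem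
      rcases hk with hk | hk <;>
        · have := pvKey_inj _ _ (by simp) hp (m : Int) (d.size : Int)
            (by positivity) (by positivity) hk.symm
          omega
    have hstep : pvStep d (i, j, v) =
        d.insert (p ++ PySem.Int.toStr (d.size : Int))
          ["v" ++ PySem.Int.toStr i, "v" ++ PySem.Int.toStr j] := by
      unfold pvStep
      rcases hv with hv | hv <;> simp [hpdef, hv]
    have hitems := PySem.Dict.items_insert_of_not_contains d
      (v := ["v" ++ PySem.Int.toStr i, "v" ++ PySem.Int.toStr j]) hfresh
    have hkeysnew := PySem.Dict.keys_insert_of_not_contains d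
      (v := ["v" ++ PySem.Int.toStr i, "v" ++ PySem.Int.toStr j]) hfresh
    set d' := d.insert (p ++ PySem.Int.toStr (d.size : Int))
      ["v" ++ PySem.Int.toStr i, "v" ++ PySem.Int.toStr j] with hd'
    have hsize' : d'.size = d.size + 1 := by
      unfold PySem.Dict.size
      rw [show d'.items = d.items ++ [_] from hitems]
      simp [PySem.Dict.size]
    have hkeys' : ∀ k ∈ d'.keys, ∃ m : Nat, m < d'.size ∧
        (k = "e" ++ PySem.Int.toStr (m : Int) ∨ k = "nt" ++ PySem.Int.toStr (m : Int)) := by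
      intro k hk
      rw [hkeysnew] at hk
      rcases List.mem_append.mp hk with hk | hk
      · obtain ⟨m, hm, hmk⟩ := hkeys k hk
        exact ⟨m, by omega, hmk⟩
      · have : k = p ++ PySem.Int.toStr (d.size : Int) := by simpa using hk
        refine ⟨d.size, by omega, ?_⟩
        rcases hp with hp | hp <;> rw [this, hp] <;> simp
    rw [List.foldl_cons, hstep, ih d' (fun c hc => hgood c (List.mem_cons_of_mem _ hc)) hkeys',
      hitems, PySem.List.enumerate_cons]
    have hfmt : pvFmt ((d.size : Int), (i, j, v)) =
        (p ++ PySem.Int.toStr (d.size : Int),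
         ["v" ++ PySem.Int.toStr i, "v" ++ PySem.Int.toStr j]) := by
      unfold pvFmt
      simp [hpdef]
    rw [List.map_cons, hfmt, hsize']
    push_cast
    simp

-- pyRange over an index suffix, mapped through indexing, is an enumerate of the dropped list
theorem pvEnumDrop (row : List Int) (s : Nat) :
    PySem.List.enumerate (row.drop s) ((s : Int)) =
      (PySem.List.pyRange (s : Int) ((row.length : Int))).map
        (fun j => (j, (PySem.List.pyGet? row j).getD 0)) := by
  have key : ∀ (d s : Nat), row.length - s ≤ d →
      PySem.List.enumerate (row.drop s) ((s : Int)) =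
        (PySem.List.pyRange (s : Int) ((row.length : Int))).map
          (fun j => (j, (PySem.List.pyGet? row j).getD 0)) := by
    intro d
    induction d with
    | zero =>
      intro s hs
      have hle : row.length ≤ s := by omega
      rw [List.drop_eq_nil_of_le hle, PySem.List.pyRange_one_eq_nil (by exact_mod_cast hle)]
      simp [PySem.List.enumerate_nil]
    | succ d ih =>
      intro s hs
      by_cases h : row.length ≤ s
      · rw [List.drop_eq_nil_of_le h, PySem.List.pyRange_one_eq_nil (by exact_mod_cast h)]
        simp [PySem.List.enumerate_nil]
      · have hlt : s < row.length := by omega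
        rw [List.drop_eq_getElem_cons hlt, PySem.List.enumerate_cons,
          PySem.List.pyRange_one_cons (by exact_mod_cast hlt), List.map_cons]
        have hget : (PySem.List.pyGet? row ((s : Int))).getD 0 = row[s] := by
          rw [PySem.List.pyGet?_natCast]
          simp [List.getElem?_eq_getElem hlt]
        rw [hget]
        have hstep : ((s : Int)) + 1 = (((s + 1 : Nat) : Int)) := by push_cast; ring
        rw [hstep, ih (s + 1) (by omega)]
  exact key row.length s (by omega)

-- filtering a map that tags a fixed i is a filterMap
theorem pvFilterMapTag (i : Int) (l : List (Int × Int)) :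
    List.filter pvGood (l.map (fun p => (i, p.1, p.2))) =
      l.filterMap (fun p => if p.2 = 1 ∨ p.2 = -1 then some (i, p.1, p.2) else none) := by
  induction l with
  | nil => rfl
  | cons p l ih =>
    simp only [List.map_cons, List.filter_cons, List.filterMap_cons]
    by_cases h : p.2 = 1 ∨ p.2 = -1
    · simp only [pvGood, h, decide_true, if_true, ih]
    · simp only [pvGood, h, decide_false, if_false, ih]
      rfl

-- A's inner loop cells for one row, given that row
theorem pvRowPartA (em : List (List Int)) (s : Nat) (r : List Int)
    (hr : (PySem.List.pyGet? em ((s : Int))).getD [] = r) :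
    List.filter pvGood
      ((PySem.List.pyRange (((s : Int)) + 1)
          (((PySem.List.pyGet? em ((s : Int))).getD []).length : Int)).map
        (fun j => (((s : Int)), j,
          (PySem.List.pyGet? ((PySem.List.pyGet? em ((s : Int))).getD []) j).getD 0))) =
      pvRowCells r s := by
  rw [hr]
  have hcast : ((s : Int)) + 1 = (((s + 1 : Nat) : Int)) := by push_cast; ring
  have hmm : (PySem.List.pyRange (((s : Int)) + 1) ((r.length : Int))).map
      (fun j => (((s : Int)), j, (PySem.List.pyGet? r j).getD 0)) =
      ((PySem.List.pyRange (((s : Int)) + 1) ((r.length : Int))).map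
        (fun j => (j, (PySem.List.pyGet? r j).getD 0))).map
        (fun p => (((s : Int)), p.1, p.2)) := by
    rw [List.map_map]
    rfl
  rw [hmm, hcast, ← pvEnumDrop r (s + 1), pvFilterMapTag]
  unfold pvRowCells
  rw [hcast]

-- A's whole qualifying-cell list equals the structural one
theorem pvOuter (em : List (List Int)) : ∀ (rows : List (List Int)) (s : Nat),
    (∀ t : Nat, (ht : t < rows.length) →
      PySem.List.pyGet? em (((s : Int)) + ((t : Int))) = some rows[t]) →
    (PySem.List.pyRange ((s : Int)) (((s : Int)) + ((rows.length : Int)))).flatMap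
      (fun i =>
        List.filter pvGood
          ((PySem.List.pyRange (i + 1)
              (((PySem.List.pyGet? em i).getD []).length : Int)).map
            (fun j => (i, j,
              (PySem.List.pyGet? ((PySem.List.pyGet? em i).getD []) j).getD 0)))) =
      pvCellsSeg rows s := by
  intro rows
  induction rows with
  | nil =>
    intro s _
    rw [show ((s : Int)) + (((List.nil (α := List Int)).length : Int)) = (s : Int) by simp,
      PySem.List.pyRange_one_eq_nil (le_refl _)]
    rfl
  | cons r rest ih =>
    intro s h
    have hlt : ((s : Int)) < ((s : Int)) + (((r :: rest).length : Int)) := by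
      push_cast [List.length_cons]; omega
    rw [PySem.List.pyRange_one_cons hlt, List.flatMap_cons]
    have h0 : PySem.List.pyGet? em ((s : Int)) = some r := by
      have := h 0 (by simp)
      simpa using this
    have hgd : (PySem.List.pyGet? em ((s : Int))).getD [] = r := by rw [h0]; rfl
    rw [pvRowPartA em s r hgd]
    have hrange : PySem.List.pyRange (((s : Int)) + 1) (((s : Int)) + (((r :: rest).length : Int)))
        = PySem.List.pyRange ((((s + 1 : Nat)) : Int)) ((((s + 1 : Nat)) : Int) + ((rest.length : Int))) := by
      congr 1; simp only [List.length_cons]; push_cast; ring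
    rw [hrange, ih (s + 1) (by
      intro t ht
      have := h (t + 1) (by simpa using Nat.succ_lt_succ ht)
      have hc : ((s : Int)) + (((t + 1 : Nat)) : Int) = (((s + 1 : Nat)) : Int) + ((t : Int)) := by
        push_cast; ring
      rw [hc] at this
      simpa using this)]
    rfl

theorem pvACells (em : List (List Int)) :
    List.filter pvGood (pvAllCells em) = pvCellsSeg em 0 := by
  unfold pvAllCells
  rw [List.filter_flatMap]
  have h := pvOuter em em 0 (by
    intro t ht
    have : ((0 : Nat) : Int) + ((t : Int)) = ((t : Nat) : Int) := by push_cast; ring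
    rw [this, PySem.List.pyGet?_natCast]
    simp [List.getElem?_eq_getElem ht])
  have hr : PySem.List.pyRange (((0 : Nat) : Int)) ((((0 : Nat)) : Int) + ((em.length : Int)))
      = PySem.List.pyRange 0 ((em.length : Int)) := by norm_num
  rw [hr] at h
  exact h

-- ===== B-side characterization =====

-- the single-row fold produces exactly the formatted qualifying cells, counter threaded
theorem pvStepB_fold (i : Int) (l : List (Int × Int)) :
    ∀ (acc : List (String × List String)) (k : Int),
    l.foldl (pvStepB i) (acc, k) =
      (acc ++ (PySem.List.enumerate
          (l.filterMap (fun p => if p.2 = 1 ∨ p.2 = -1 then some (i, p.1, p.2) else none)) k).map pvFmt,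
       k + ((l.filterMap (fun p => if p.2 = 1 ∨ p.2 = -1 then some (i, p.1, p.2) else none)).length : Int)) := by
  induction l with
  | nil => intro acc k; simp [PySem.List.enumerate_nil]
  | cons p l ih =>
    intro acc k
    rw [List.foldl_cons]
    by_cases h : p.2 = 1 ∨ p.2 = -1
    · have hstep : pvStepB i (acc, k) p =
          (acc ++ [pvFmt (k, (i, p.1, p.2))], k + 1) := by
        unfold pvStepB pvFmt
        simp [h]
      rw [hstep, ih]
      simp only [List.filterMap_cons, h, if_true, PySem.List.enumerate_cons, List.map_cons,
        List.length_cons]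
      rw [List.append_assoc, Prod.mk.injEq]
      exact ⟨rfl, by push_cast; ring⟩
    · have hstep : pvStepB i (acc, k) p = (acc, k) := by
        unfold pvStepB
        simp [h]
      rw [hstep, ih]
      simp only [List.filterMap_cons, h, if_false]
  
theorem pvRowB_char (row : List Int) (s : Nat) (k : Int) :
    pvRowB row ((s : Int)) k =
      ((PySem.List.enumerate (pvRowCells row s) k).map pvFmt,
       k + ((pvRowCells row s).length : Int)) := by
  unfold pvRowB pvRowCells
  have hcast : ((s : Int)) + 1 = (((s + 1 : Nat) : Int)) := by push_cast; ring
  rw [hcast, PySem.List.slice_from_natCast, pvStepB_fold]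
  simp

theorem pvCellsSeg_append (xs ys : List (List Int)) : ∀ (i : Nat),
    pvCellsSeg (xs ++ ys) i = pvCellsSeg xs i ++ pvCellsSeg ys (i + xs.length) := by
  induction xs with
  | nil => intro i; simp [pvCellsSeg]
  | cons x xs ih =>
    intro i
    simp only [List.cons_append, pvCellsSeg, ih (i + 1), List.append_assoc, List.length_cons]
    rw [show i + 1 + xs.length = i + (xs.length + 1) by omega]

theorem pvGoB_split (rows : List (List Int)) (i k : Int)
    (h0 : ¬ rows.length = 0) (h1 : ¬ rows.length = 1) :
    pvGoB rows i k =
      ((pvGoB (rows.take (rows.length / 2)) i k).1 ++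
        (pvGoB (rows.drop (rows.length / 2)) (i + ((rows.length / 2 : Nat) : Int))
          (pvGoB (rows.take (rows.length / 2)) i k).2).1,
       (pvGoB (rows.drop (rows.length / 2)) (i + ((rows.length / 2 : Nat) : Int))
          (pvGoB (rows.take (rows.length / 2)) i k).2).2) := by
  rw [pvGoB, dif_neg h0, dif_neg h1]

theorem pvGoB_char : ∀ (n : Nat) (rows : List (List Int)), rows.length ≤ n →
    ∀ (i : Nat) (k : Int),
    pvGoB rows ((i : Int)) k =
      ((PySem.List.enumerate (pvCellsSeg rows i) k).map pvFmt,
       k + ((pvCellsSeg rows i).length : Int)) := by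
  intro n
  induction n with
  | zero =>
    intro rows hr i k
    have : rows = [] := List.eq_nil_of_length_eq_zero (by omega)
    subst this
    rw [pvGoB]
    simp [pvCellsSeg, PySem.List.enumerate_nil]
  | succ n ih =>
    intro rows hr i k
    by_cases h0 : rows.length = 0
    · have : rows = [] := List.eq_nil_of_length_eq_zero h0
      subst this
      rw [pvGoB]
      simp [pvCellsSeg, PySem.List.enumerate_nil]
    · by_cases h1 : rows.length = 1
      · rw [pvGoB, dif_neg h0, dif_pos h1]
        obtain ⟨r, hrr⟩ := List.length_eq_one_iff.mp h1
        subst hrr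
        have : ([r] : List (List Int)).headI = r := rfl
        rw [this, pvRowB_char]
        simp [pvCellsSeg]
      · have h2 : 2 ≤ rows.length := by omega
        set h := rows.length / 2 with hh
        have hhb : 1 ≤ h ∧ h < rows.length := by constructor <;> omega
        have htl : (rows.take h).length = h := by
          rw [List.length_take]; omega
        have hdl : (rows.drop h).length = rows.length - h := by
          rw [List.length_drop]
        have ih1 := ih (rows.take h) (by omega) i k
        have hcast : ((i : Int)) + ((h : Int)) = (((i + h : Nat)) : Int) := by push_cast; ring
        have ih2 := ih (rows.drop h) (by omega) (i + h)
          (k + ((pvCellsSeg (rows.take h) i).length : Int))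
        rw [pvGoB_split rows ((i : Int)) k h0 h1, ih1]
        simp only
        rw [hcast, ih2]
        simp only
        have hsplit : pvCellsSeg rows i =
            pvCellsSeg (rows.take h) i ++ pvCellsSeg (rows.drop h) (i + h) := by
          conv_lhs => rw [← List.take_append_drop h rows]
          rw [pvCellsSeg_append, htl]
        rw [hsplit, PySem.List.enumerate_append, List.map_append, List.length_append]
        rw [Prod.mk.injEq]
        exact ⟨rfl, by push_cast; ring⟩

-- distinct non-negative counters give distinct keys
theorem pvEnum_fst_ge {α : Type} (xs : List α) : ∀ (s : Int),
    ∀ p ∈ PySem.List.enumerate xs s, s ≤ p.1 := by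
  induction xs with
  | nil => intro s p hp; simp [PySem.List.enumerate_nil] at hp
  | cons x xs ih =>
    intro s p hp
    rw [PySem.List.enumerate_cons] at hp
    rcases List.mem_cons.mp hp with hp | hp
    · subst hp; exact le_refl s
    · have := ih (s + 1) p hp; omega

theorem pvEnum_pairwise {α : Type} (xs : List α) : ∀ (s : Int),
    (PySem.List.enumerate xs s).Pairwise (fun p q => p.1 < q.1) := by
  induction xs with
  | nil => intro s; simp [PySem.List.enumerate_nil]
  | cons x xs ih =>
    intro s
    rw [PySem.List.enumerate_cons]
    refine List.Pairwise.cons ?_ (ih (s + 1))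
    intro q hq
    have := pvEnum_fst_ge xs (s + 1) q hq
    simpa using by omega

theorem pvNodup_keys (cells : List (Int × Int × Int)) :
    (((PySem.List.enumerate cells).map pvFmt).map Prod.fst).Nodup := by
  rw [List.map_map]
  have hpair := pvEnum_pairwise cells 0
  have hnn : ∀ q ∈ PySem.List.enumerate cells (0 : Int), 0 ≤ q.1 :=
    pvEnum_fst_ge cells 0
  rw [List.Nodup, List.pairwise_map]
  have hmem : (PySem.List.enumerate cells).Pairwise
      (fun p q : Int × Int × Int × Int => 0 ≤ p.1 ∧ 0 ≤ q.1) :=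
    List.pairwise_of_forall_mem_list (fun a ha b hb => ⟨hnn a ha, hnn b hb⟩)
  refine (hpair.and hmem).imp ?_
  · rintro a b ⟨hlt, ha, hb⟩
    intro h
    have := pvKey_inj _ _ (by by_cases h1 : a.2.2.2 = 1 <;> simp [h1])
      (by by_cases h1 : b.2.2.2 = 1 <;> simp [h1]) a.1 b.1 ha hb h
    omega

theorem pvB_items (em : List (List Int)) :
    format_edges_step_alt em = (PySem.List.enumerate (pvCellsSeg em 0) 0).map pvFmt := by
  have hgo := pvGoB_char em.length em (le_refl _) 0 0
  have h0 : ((0 : Nat) : Int) = (0 : Int) := rfl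
  rw [h0] at hgo
  unfold format_edges_step_alt
  rw [show (pvGoB em 0 0).1 = (PySem.List.enumerate (pvCellsSeg em 0) 0).map pvFmt from by
    rw [hgo]]
  unfold PySem.Dict.ofList PySem.Dict.update
  rw [show (fun (acc : PySem.Dict String (List String)) (p : String × List String) =>
        acc.insert p.1 p.2) = fun d a => d.insert (Prod.fst a) (Prod.snd a) from rfl]
  rw [PySem.Dict.items_foldl_insert_fresh _ Prod.fst Prod.snd PySem.Dict.empty
    (by intro a _; rfl)
    (by exact pvNodup_keys (pvCellsSeg em 0))]
  simp [PySem.Dict.empty]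

-- ===== VERDICT (by name: the statement is the Claim_ definition above) =====
theorem format_edges_step_spec : Claim_equal_format_edges_step := by
  intro em _
  unfold Spec_format_edges_step
  rw [pvA_eq_fold, pvFold_filter, pvB_items,
    pvFold_items ((pvAllCells em).filter pvGood) PySem.Dict.empty
      (by
        intro c hc
        simpa [pvGood] using List.of_mem_filter hc)
      (by intro k hk; simp [PySem.Dict.empty, PySem.Dict.keys] at hk)]
  rw [pvACells]
  simp [PySem.Dict.empty, PySem.Dict.size]
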